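-- pv_equiv track=rewrite | github.com/Bhagyesh59/llm_api | app/util_function.py | get_last_candidate_messages
-- ===== SOURCE A (Python) =====
-- def get_last_candidate_messages(messages):
--     """
--     Get all the last consecutive messages sent by the CANDIDATE.
--
--     Args:
--         messages (list): List of message dictionaries, each containing a 'sender' key.
--
--     Returns:
--         list: A list of the last consecutive messages from the CANDIDATE, in chronological order.
--     """
--     last_candidate_messages = []
--     for message in reversed(messages):  # Iterate over messages in reverse order
--         if message["sender"] == "CANDIDATE":
--             last_candidate_messages.append(message)
--
--         else:
--             break  # Stop as soon as a message not from CANDIDATE is encountered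
--     return list(
--         reversed(last_candidate_messages)
--     )  # Reverse to maintain chronological order
-- ===== SOURCE B (Python) =====
-- def get_last_candidate_messages(messages):
--     i = len(messages)
--     while i > 0 and messages[i - 1]["sender"] == "CANDIDATE":
--         i -= 1
--     return messages[i:]
-- ===== Notes on version B (the rewrite author's own statement) =====
-- stated objective: simpler
-- what changed: Replaces the backward accumulate-with-break loop plus final reversal by an index-decrementing while loop that finds the run boundary and returns one slice messages[i:], building no temporary list and doing no reversal.
import Mathlib
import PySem

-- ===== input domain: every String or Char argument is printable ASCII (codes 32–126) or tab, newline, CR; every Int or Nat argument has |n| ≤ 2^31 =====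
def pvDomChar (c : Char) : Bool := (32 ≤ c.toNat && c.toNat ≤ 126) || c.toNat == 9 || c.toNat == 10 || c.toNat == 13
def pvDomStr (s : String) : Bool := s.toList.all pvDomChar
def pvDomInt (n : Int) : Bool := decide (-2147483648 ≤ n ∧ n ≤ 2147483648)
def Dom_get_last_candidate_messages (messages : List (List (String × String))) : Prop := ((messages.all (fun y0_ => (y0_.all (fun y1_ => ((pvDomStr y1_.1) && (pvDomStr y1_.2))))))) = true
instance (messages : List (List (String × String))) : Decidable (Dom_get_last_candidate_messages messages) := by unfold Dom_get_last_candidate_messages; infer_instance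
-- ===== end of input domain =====

-- B replaces A's backward accumulate-with-break-then-reverse by an index-decrementing
-- while loop that finds the run boundary and returns one slice (simpler decomposition; no speed claim).


-- ===== PORT A =====
-- 'for message in reversed(messages): if … append … else break' — structural recursion
-- over messages.reverse, cutting off at the first non-CANDIDATE message, then reversed.
def pvALoop (l : List (List (String × String))) : List (List (String × String)) :=
  match l with
  | [] => []
  | m :: rest =>
      if (PySem.Dict.mk m).get? "sender" == some "CANDIDATE" then m :: pvALoop rest else []

def get_last_candidate_messages (messages : List (List (String × String))) : List (List (String × String)) :=
  (pvALoop messages.reverse).reverse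

-- ===== PORT B =====
-- 'i = len(messages); while i > 0 and messages[i-1]["sender"] == "CANDIDATE": i -= 1'
-- — recursion on the counter i; the access messages[i-1] is always in range (0 < i ≤ len),
-- so List.getD is exact for it.
def pvBLoop (messages : List (List (String × String))) : Nat → Nat
  | 0 => 0
  | j + 1 =>
      if (PySem.Dict.mk (messages.getD j [])).get? "sender" == some "CANDIDATE"
      then pvBLoop messages j else j + 1

def get_last_candidate_messages_alt (messages : List (List (String × String))) : List (List (String × String)) :=
  PySem.List.slice messages (some ((pvBLoop messages messages.length : Nat) : Int)) none

-- ===== PRECONDITION & SPEC =====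
-- Pre_ excludes exactly the inputs on which the Python A raises KeyError: those where the
-- first message from the end that is not a CANDIDATE message lacks a "sender" key (B raises
-- the same KeyError there); every input on which A returns satisfies Pre_.
def Pre_get_last_candidate_messages (messages : List (List (String × String))) : Prop :=
  ((messages.reverse.dropWhile
      (fun m => (PySem.Dict.mk m).get? "sender" == some "CANDIDATE")).head?.all
    (fun m => ((PySem.Dict.mk m).get? "sender").isSome)) = true
instance (messages : List (List (String × String))) : Decidable (Pre_get_last_candidate_messages messages) := by unfold Pre_get_last_candidate_messages; infer_instance
def pvWitness_get_last_candidate_messages : (List (List (String × String))) :=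
  [[("sender", "BOT")], [("sender", "CANDIDATE")]]

def Spec_get_last_candidate_messages (messages : List (List (String × String))) (out : List (List (String × String))) : Prop := out = get_last_candidate_messages_alt messages
instance (messages : List (List (String × String))) (out : List (List (String × String))) : Decidable (Spec_get_last_candidate_messages messages out) := by unfold Spec_get_last_candidate_messages; infer_instance

-- ===== CLAIM (what is proved, stated in full; the proofs are below) =====
def Claim_equal_get_last_candidate_messages : Prop := ∀ (messages : List (List (String × String))), Dom_get_last_candidate_messages messages → Pre_get_last_candidate_messages messages → Spec_get_last_candidate_messages messages (get_last_candidate_messages messages)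

-- ===== LEMMAS AND PROOFS =====

theorem pvBLoop_le (messages : List (List (String × String))) (i : Nat) :
    pvBLoop messages i ≤ i := by
  induction i with
  | zero => simp [pvBLoop]
  | succ j ih => simp only [pvBLoop]; split <;> omega

theorem pvBLoop_append (ms : List (List (String × String))) (m : List (String × String))
    (j : Nat) (h : j ≤ ms.length) : pvBLoop (ms ++ [m]) j = pvBLoop ms j := by
  induction j with
  | zero => rfl
  | succ k ih =>
      simp only [pvBLoop, List.getD, List.getElem?_append_left (by omega : k < ms.length), ih (by omega)]
      rfl


theorem pvMain (messages : List (List (String × String))) :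
    get_last_candidate_messages messages = get_last_candidate_messages_alt messages := by
  induction messages using List.reverseRecOn with
  | nil =>
      simp [get_last_candidate_messages, get_last_candidate_messages_alt, pvALoop, pvBLoop,
        PySem.List.slice]
  | append_singleton ms m ih =>
      unfold get_last_candidate_messages get_last_candidate_messages_alt
      have hget : (ms ++ [m]).getD ms.length [] = m := by
        simp [List.getD]
      simp only [List.reverse_append, List.reverse_cons, List.reverse_nil, List.nil_append,
        List.singleton_append, pvALoop, List.length_append, List.length_cons, List.length_nil,
        pvBLoop, hget]
      by_cases hc : ((PySem.Dict.mk m).get? "sender" == some "CANDIDATE") = true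
      · rw [if_pos hc, if_pos hc, pvBLoop_append ms m ms.length le_rfl]
        have hle := pvBLoop_le ms ms.length
        rw [PySem.List.slice_from_natCast, List.drop_append_of_le_length hle]
        have ihe : (pvALoop ms.reverse).reverse = ms.drop (pvBLoop ms ms.length) := by
          simpa [get_last_candidate_messages, get_last_candidate_messages_alt,
            PySem.List.slice_from_natCast] using ih
        simp [ihe]
      · rw [if_neg hc, if_neg hc]
        rw [PySem.List.slice_from_natCast]
        simp

-- ===== VERDICT (by name: the statement is the Claim_ definition above) =====

theorem get_last_candidate_messages_spec : Claim_equal_get_last_candidate_messages := by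
  intro messages _ _
  unfold Spec_get_last_candidate_messages
  exact pvMain messages
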